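-- pv_equiv track=rewrite | github.com/poncema4/NeetCode-150 | day_22/(___) practice/solution2.py | shuffleDeck
-- ===== SOURCE A (Python) =====
-- from typing import List
-- from collections import deque
--
-- def shuffleDeck(deck: List[int]) -> int:
--     """
--     Repeatedly move the top card to the bottom until the deck is sorted in ascending order,
--     return the number of moves it takes, or return -1 if it is not possible
--     """
--     n = len(deck)
--     target = list(range(1, n + 1))
--     if deck == target: return 0
--     if sorted(deck) != target: return -1
--
--     queue = deque(deck)
--     moves = 0
--
--     while True:
--         queue.append(queue.popleft())
--         moves += 1
--         if list(queue) == target: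
--             return moves
--         if moves > n:
--             return -1
-- ===== SOURCE B (Python) =====
-- def shuffleDeck(deck):
--     """
--     Repeatedly move the top card to the bottom until the deck is sorted in ascending order,
--     return the number of moves it takes, or return -1 if it is not possible
--     """
--     n = len(deck)
--     if n == 0:
--         return 0
--     try:
--         k = deck.index(1)
--     except ValueError:
--         return -1
--     for i, v in enumerate(deck):
--         if v != (i - k) % n + 1:
--             return -1
--     return k
-- ===== Notes on version B (the rewrite author's own statement) =====
-- stated objective: faster
-- what changed: B replaces A's O(n^2) rotation simulation (rotate the deque up to n+1 times, comparing the whole list to the target each time) by a single pass: locate the index k of card 1 and verify deck[i] == (i-k) % n + 1 for all i, returning k or -1.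
import Mathlib
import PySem

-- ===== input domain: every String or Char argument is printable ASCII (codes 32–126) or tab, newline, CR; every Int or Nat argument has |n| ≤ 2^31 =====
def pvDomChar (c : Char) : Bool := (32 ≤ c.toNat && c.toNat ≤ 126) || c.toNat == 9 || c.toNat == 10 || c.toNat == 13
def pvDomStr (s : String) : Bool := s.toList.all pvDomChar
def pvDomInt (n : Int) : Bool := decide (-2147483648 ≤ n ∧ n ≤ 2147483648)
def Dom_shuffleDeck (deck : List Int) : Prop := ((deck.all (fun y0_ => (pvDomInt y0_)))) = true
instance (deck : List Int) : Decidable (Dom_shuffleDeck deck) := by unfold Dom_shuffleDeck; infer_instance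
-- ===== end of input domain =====

-- B computes the answer in one pass (the index of card 1 plus a rotation check)
-- instead of simulating up to n+1 deque rotations with a full list comparison each time.

-- ===== PORT A =====
-- target = list(range(1, n + 1))
def pvTgt (n : Nat) : List Int := PySem.List.pyRange 1 ((n : Int) + 1) 1

-- A's 'while True' loop: rotate the queue, moves += 1, compare with target, bail out when
-- moves > n; fuel = n + 1 bounds the recursion (the loop always returns once moves > n).
def shuffleDeckLoop (target : List Int) (n : Nat) : List Int → Nat → Nat → Int
  | _, _, 0 => -1
  | q, moves, fuel + 1 =>
    match q with
    | [] => -1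
    | x :: xs =>
      if xs ++ [x] = target then ((moves + 1 : Nat) : Int)
      else if moves + 1 > n then -1
      else shuffleDeckLoop target n (xs ++ [x]) (moves + 1) fuel

def shuffleDeck (deck : List Int) : Int :=
  let n := deck.length
  let target := pvTgt n
  if deck = target then 0
  else if ¬ (PySem.List.sorted deck (fun x => x) false = target) then -1
  else shuffleDeckLoop target n deck 0 (n + 1)

-- ===== PORT B =====
def shuffleDeck_alt (deck : List Int) : Int :=
  let n : Int := deck.length
  if n = 0 then 0
  else
    match PySem.List.index? deck 1 with
    | none => -1
    | some k =>
      if (PySem.List.enumerate deck 0).all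
          (fun iv => iv.2 == PySem.Int.mod (iv.1 - (k : Int)) n + 1)
      then (k : Int) else -1

-- ===== PRECONDITION & SPEC =====
def Spec_shuffleDeck (deck : List Int) (out : Int) : Prop := out = shuffleDeck_alt deck
instance (deck : List Int) (out : Int) : Decidable (Spec_shuffleDeck deck out) := by unfold Spec_shuffleDeck; infer_instance

-- ===== CLAIM (what is proved, stated in full; the proofs are below) =====
def Claim_equal_shuffleDeck : Prop := ∀ (deck : List Int), Dom_shuffleDeck deck → Spec_shuffleDeck deck (shuffleDeck deck)

-- ===== LEMMAS AND PROOFS =====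

theorem pvTgt_length (n : Nat) : (pvTgt n).length = n := by
  simp [pvTgt, PySem.List.length_pyRange_one]
theorem pvTgt_getElem (n i : Nat) (h : i < (pvTgt n).length) : (pvTgt n)[i] = (i : Int) + 1 := by
  simp [pvTgt, PySem.List.getElem_pyRange_one]; ring
def Chk (deck : List Int) (k : Int) : Prop :=
  ∀ i (h : i < deck.length), deck[i] = ((i : Int) - k) % (deck.length : Int) + 1

theorem chk_iff_all (deck : List Int) (k : Nat) (hn : 0 < deck.length) :
    ((PySem.List.enumerate deck 0).all
      (fun iv => iv.2 == PySem.Int.mod (iv.1 - (k : Int)) (deck.length : Int) + 1) = true)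
    ↔ Chk deck k := by
  have hmod : ∀ a : Int, PySem.Int.mod a (deck.length : Int) = a % (deck.length : Int) :=
    fun a => PySem.Int.mod_eq_emod_of_pos (by exact_mod_cast hn)
  rw [List.all_eq_true]
  constructor
  · intro h i hi
    have := h ((i : Int), deck[i]) ((PySem.List.mem_enumerate_iff deck 0 _).mpr ⟨i, hi, by simp⟩)
    simpa [hmod] using this
  · intro h p hp
    obtain ⟨j, hj, rfl⟩ := (PySem.List.mem_enumerate_iff deck 0 p).mp hp
    simpa [hmod] using h j hj
theorem emod_shift (a b n : Int) (h0 : 0 ≤ a) (h1 : a < n) : ((a + b) % n - b) % n = a := by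
  have e1 : ((a + b) % n - b) % n = ((a + b) - b) % n := by
    conv_lhs => rw [Int.sub_emod, Int.emod_emod_of_dvd _ dvd_rfl, ← Int.sub_emod]
  rw [e1]
  simp
  exact Int.emod_eq_of_lt h0 h1
theorem chk_rotate (deck : List Int) (k : Nat) (_hk : k < deck.length) (h : Chk deck k) :
    deck.rotate k = pvTgt deck.length := by
  apply List.ext_getElem
  · simp [pvTgt_length]
  · intro i h1 h2
    have hi : i < deck.length := by simpa using h1
    rw [List.getElem_rotate, pvTgt_getElem]
    rw [h _ (Nat.mod_lt _ (by omega))]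
    have hcast : (((i + k) % deck.length : Nat) : Int) = ((i : Int) + k) % (deck.length : Int) := by
      push_cast; ring_nf
    rw [hcast]
    have := emod_shift (i : Int) (k : Int) (deck.length : Int) (by positivity) (by exact_mod_cast hi)
    omega
theorem rotate_chk (deck : List Int) (j : Nat) (hj : j < deck.length)
    (h : deck.rotate j = pvTgt deck.length) : Chk deck j := by
  have hdeck : deck = (pvTgt deck.length).rotate (deck.length - j) := by
    rw [← h, List.rotate_rotate]
    have : j + (deck.length - j) = deck.length := by omega
    rw [this, List.rotate_length]
  intro i hi
  rw [List.getElem_of_eq hdeck hi, List.getElem_rotate, pvTgt_getElem]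
  have hlt : (i + (deck.length - j)) % (pvTgt deck.length).length < deck.length := by
    rw [pvTgt_length]; exact Nat.mod_lt _ (by omega)
  have hcast : (((i + (deck.length - j)) % (pvTgt deck.length).length : Nat) : Int)
      = ((i : Int) - j) % (deck.length : Int) := by
    rw [pvTgt_length]
    push_cast [Nat.cast_sub (le_of_lt hj)]
    have : (i : Int) + ((deck.length : Int) - j) = ((i : Int) - j) + deck.length := by ring
    rw [this, Int.add_emod_right]
  rw [hcast]
theorem index?_eq_some_of (xs : List Int) (v : Int) (k : Nat) (hk : k < xs.length)
    (h1 : xs[k] = v) (h2 : ∀ j (hj : j < xs.length), j < k → xs[j] ≠ v) :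
    PySem.List.index? xs v = some k := by
  induction xs generalizing k with
  | nil => simp at hk
  | cons x xs ih =>
    cases k with
    | zero =>
      simp at h1
      rw [h1, PySem.List.index?_cons_self]
    | succ k' =>
      have hx : x ≠ v := by
        have := h2 0 (by simp) (by omega)
        simpa using this
      rw [PySem.List.index?_cons_of_ne xs hx]
      rw [ih k' (by simpa using hk) (by simpa using h1)
        (fun j hj hjk => by
          have := h2 (j+1) (by simpa using Nat.succ_lt_succ hj) (by omega)
          simpa using this)]
      rfl
theorem chk_index (deck : List Int) (k : Nat) (hk : k < deck.length) (h : Chk deck k) :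
    PySem.List.index? deck 1 = some k := by
  apply index?_eq_some_of deck 1 k hk
  · rw [h k hk]
    have : ((k : Int) - k) % (deck.length : Int) = 0 := by simp
    omega
  · intro j hj hjk
    rw [h j hj]
    have : ((j : Int) - k) % (deck.length : Int) = (j : Int) - k + deck.length := by
      have : ((j : Int) - k) % (deck.length : Int) = ((j : Int) - k + deck.length) % deck.length := by
        rw [Int.add_emod_right]
      rw [this]
      apply Int.emod_eq_of_lt <;> omega
    omega

theorem rotate_one_cons (x : Int) (xs : List Int) : (x :: xs).rotate 1 = xs ++ [x] := by
  simp

theorem loop_success (n : Nat) (hn : 0 < n) :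
    ∀ (k fuel moves : Nat) (q : List Int), q.length = n → 1 ≤ k → k ≤ fuel → moves + k ≤ n →
      q.rotate k = pvTgt n → (∀ j : Nat, 1 ≤ j → j < k → q.rotate j ≠ pvTgt n) →
      shuffleDeckLoop (pvTgt n) n q moves fuel = ((moves + k : Nat) : Int) := by
  intro k
  induction k with
  | zero => intro fuel moves q _ h1; omega
  | succ k' ih =>
    intro fuel moves q hq h1 h2 h3 hrot hmin
    obtain ⟨fuel', rfl⟩ : ∃ f, fuel = f + 1 := ⟨fuel - 1, by omega⟩
    obtain ⟨x, xs, rfl⟩ : ∃ x xs, q = x :: xs := by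
      cases q with
      | nil => simp at hq; omega
      | cons a b => exact ⟨a, b, rfl⟩
    rw [shuffleDeckLoop]
    cases Nat.eq_or_lt_of_le h1 with
    | inl hk1 =>
      -- k' + 1 = 1
      have hk' : k' = 0 := by omega
      subst hk'
      have : xs ++ [x] = pvTgt n := by rw [← rotate_one_cons]; exact hrot
      rw [if_pos this]
    | inr hk1 =>
      have hne : ¬ (xs ++ [x] = pvTgt n) := by
        rw [← rotate_one_cons]
        exact hmin 1 (le_refl 1) (by omega)
      rw [if_neg hne, if_neg (by omega : ¬ moves + 1 > n)]
      have := ih fuel' (moves + 1) (xs ++ [x]) (by simp at hq ⊢; omega) (by omega) (by omega) (by omega)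
        (by rw [← rotate_one_cons, List.rotate_rotate]
            have : 1 + k' = k' + 1 := by omega
            rw [this]; exact hrot)
        (fun j hj1 hj2 => by
          rw [← rotate_one_cons, List.rotate_rotate]
          exact hmin (1 + j) (by omega) (by omega))
      rw [this]
      congr 1
      omega

theorem loop_fail (n : Nat) :
    ∀ (fuel : Nat) (q : List Int) (moves : Nat),
      (∀ j : Nat, q.rotate j ≠ pvTgt n) →
      shuffleDeckLoop (pvTgt n) n q moves fuel = -1 := by
  intro fuel
  induction fuel with
  | zero => intro q moves _; rfl
  | succ f ih =>
    intro q moves hno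
    cases q with
    | nil => rfl
    | cons x xs =>
      rw [shuffleDeckLoop]
      have hne : ¬ (xs ++ [x] = pvTgt n) := by
        rw [← rotate_one_cons]; exact hno 1
      rw [if_neg hne]
      by_cases hm : moves + 1 > n
      · rw [if_pos hm]
      · rw [if_neg hm]
        exact ih (xs ++ [x]) (moves + 1)
          (fun j => by rw [← rotate_one_cons, List.rotate_rotate]; exact hno (1 + j))

theorem main_eq (deck : List Int) : shuffleDeck deck = shuffleDeck_alt deck := by
  by_cases h0 : deck.length = 0
  · have : deck = [] := List.length_eq_zero_iff.mp h0
    subst this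
    rfl
  · have hn : 0 < deck.length := Nat.pos_of_ne_zero h0
    simp only [shuffleDeck, shuffleDeck_alt]
    rw [if_neg (by exact_mod_cast h0 : ¬ ((deck.length : Int) = 0))]
    by_cases hdt : deck = pvTgt deck.length
    · rw [if_pos hdt]
      have hchk : Chk deck 0 := by
        intro i hi
        rw [List.getElem_of_eq hdt hi, pvTgt_getElem]
        have : ((i : Int) - 0) % (deck.length : Int) = (i : Int) := by
          simp
          exact Int.emod_eq_of_lt (by positivity) (by exact_mod_cast hi)
        rw [this]
      rw [chk_index deck 0 hn hchk]
      have hall := (chk_iff_all deck 0 hn).mpr hchk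
      dsimp only
      rw [if_pos hall]
      simp
    · rw [if_neg hdt]
      cases hidx : PySem.List.index? deck 1 with
      | none =>
        have h1mem : ¬ (1 : Int) ∈ deck := (PySem.List.index?_eq_none_iff deck 1).mp hidx
        have hsort : ¬ (PySem.List.sorted deck (fun x => x) false = pvTgt deck.length) := by
          intro hs
          apply h1mem
          rw [← PySem.List.mem_sorted deck (fun x => x) false 1, hs]
          exact PySem.List.mem_pyRange_one.mpr ⟨le_refl 1, by omega⟩
        rw [if_pos hsort]
      | some k =>
        obtain ⟨hk, hdk, hmin⟩ := PySem.List.getElem_of_index?_eq_some hidx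
        by_cases hchk : Chk deck k
        · have hall := (chk_iff_all deck k hn).mpr hchk
          have hrot := chk_rotate deck k hk hchk
          have hkne : k ≠ 0 := by
            intro hz
            subst hz
            rw [List.rotate_zero] at hrot
            exact hdt hrot
          have hperm : (pvTgt deck.length).Perm deck := hrot ▸ List.rotate_perm deck k
          have hsort : PySem.List.sorted deck (fun x => x) false = pvTgt deck.length :=
            PySem.List.sorted_eq_of_perm_of_pairwise_lt deck _ _ hperm
              (by simpa using PySem.List.pairwise_lt_pyRange_one 1 ((deck.length : Int) + 1))
          rw [if_neg (not_not_intro hsort)]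
          rw [loop_success deck.length hn k (deck.length + 1) 0 deck rfl (by omega) (by omega)
            (by omega) hrot
            (fun j hj1 hj2 hcon => by
              have hjk := chk_index deck j (by omega) (rotate_chk deck j (by omega) hcon)
              rw [hidx] at hjk
              injection hjk with h
              omega)]
          simp [hall]
        · have hallne : ¬ ((PySem.List.enumerate deck 0).all
              (fun iv => iv.2 == PySem.Int.mod (iv.1 - (k : Int)) (deck.length : Int) + 1) = true) :=
            fun h => hchk ((chk_iff_all deck k hn).mp h)
          by_cases hsort : PySem.List.sorted deck (fun x => x) false = pvTgt deck.length
          · rw [if_neg (not_not_intro hsort)]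
            rw [loop_fail deck.length (deck.length + 1) deck 0
              (fun j hcon => by
                have hmj : deck.rotate (j % deck.length) = pvTgt deck.length := by
                  rw [List.rotate_mod]; exact hcon
                rcases Nat.eq_zero_or_pos (j % deck.length) with hz | hpos
                · rw [hz, List.rotate_zero] at hmj; exact hdt hmj
                · have hjlt : j % deck.length < deck.length := Nat.mod_lt _ hn
                  have hjk := chk_index deck (j % deck.length) hjlt (rotate_chk deck _ hjlt hmj)
                  rw [hidx] at hjk
                  injection hjk with heq
                  rw [← heq] at hmj
                  exact hchk (rotate_chk deck k (by omega) hmj))]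
            simp [hallne]
          · rw [if_pos hsort]
            simp [hallne]

-- ===== VERDICT (by name: the statement is the Claim_ definition above) =====
theorem shuffleDeck_spec : Claim_equal_shuffleDeck := by
  intro deck _
  exact main_eq deck
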